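-- pv_equiv track=rewrite | github.com/hsn8086/exam | codeforces/ungrouped/cf2027c.py | search
-- ===== SOURCE A (Python) =====
-- def search(a, m, n):
--     q = set()
--
--     q.add(n)
--
--     max_l = 0
--     try:
--         while 1:
--             n = q.pop()
--             max_l = max(n, max_l)
--             for i in m.get(n, []):
--                 if i:
--                     q.add(n + i)
--     except KeyError:
--         return max_l
-- ===== SOURCE B (Python) =====
-- def search(a, m, n):
--     # Recursive DFS threading the maximum through the call tree instead of
--     # an explicit set-worklist; the start node is always counted, and the
--     # result is clamped at 0 exactly as A's max_l = 0 initialisation does.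
--     def dfs(x):
--         best = x
--         for i in m.get(x, []):
--             if i:
--                 best = max(best, dfs(x + i))
--         return best
--     return max(0, dfs(n))
-- ===== Notes on version B (the rewrite author's own statement) =====
-- stated objective: simpler
-- what changed: Replaces A's iterative set-worklist loop (terminated by catching KeyError from pop on the empty set) with a plain recursive DFS that threads the running maximum through the recursion, wrapped in max(0, ...).
import Mathlib
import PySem

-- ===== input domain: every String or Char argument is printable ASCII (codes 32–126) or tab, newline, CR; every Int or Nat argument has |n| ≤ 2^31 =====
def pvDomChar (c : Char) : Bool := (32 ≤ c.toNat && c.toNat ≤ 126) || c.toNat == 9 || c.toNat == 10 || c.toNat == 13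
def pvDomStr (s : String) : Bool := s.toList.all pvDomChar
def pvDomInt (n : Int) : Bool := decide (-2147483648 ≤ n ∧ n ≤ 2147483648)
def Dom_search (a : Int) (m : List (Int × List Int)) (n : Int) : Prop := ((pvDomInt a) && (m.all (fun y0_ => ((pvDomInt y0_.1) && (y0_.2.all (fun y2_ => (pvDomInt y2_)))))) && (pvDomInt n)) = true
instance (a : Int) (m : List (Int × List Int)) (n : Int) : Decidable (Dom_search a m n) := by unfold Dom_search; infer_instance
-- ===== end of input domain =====

-- B replaces A's iterative set-worklist loop with a plain recursive DFS threading the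
-- running maximum (objective: simpler).  The equivalence is about the RETURN value:
-- Python's arbitrary set.pop order does not affect the returned maximum, so the port of A
-- pops the first-inserted element.

-- ===== PORT A =====
-- Shared fuel helpers (totalisation guards only — under Pre_search the fuel is proved
-- sufficient, so they change neither algorithm): pySuccs m x = the nodes x+i for the
-- nonzero increments i of m[x]; reachK m x = the nodes reachable from x (a bounded
-- fixed-point iteration); rankK m x = how many of them are keys of m.
def pySuccs (m : List (Int × List Int)) (x : Int) : List Int :=
  (((List.lookup x m).getD []).filter (fun i => decide (i ≠ 0))).map (fun i => x + i)

def gstep (m : List (Int × List Int)) (S : Finset Int) : Finset Int :=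
  S ∪ S.biUnion (fun y => (pySuccs m y).toFinset)

def reachT (m : List (Int × List Int)) : Nat := 1 + m.length * (m.map (fun p => p.2.length)).sum

def reachK (m : List (Int × List Int)) (x : Int) : Finset Int := (gstep m)^[reachT m] {x}

def rankK (m : List (Int × List Int)) (x : Int) : Nat :=
  (reachK m x ∩ (m.map Prod.fst).toFinset).card

def fuelC (m : List (Int × List Int)) : Nat := (m.map (fun p => p.2.length)).sum + 2

def searchFuel (m : List (Int × List Int)) (x : Int) : Nat := fuelC m ^ rankK m x

-- A's `while 1` loop need not terminate (reachable increment cycles); under Pre_search it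
-- does, and the input-derived fuel `searchFuel` is proved sufficient (loop_eq below).
-- m.get(n, []) = first-match lookup on the association list.
def searchLoop (m : List (Int × List Int)) : Nat → PySem.Set Int → Int → Int
  | 0, _, maxl => maxl
  | _ + 1, [], maxl => maxl        -- q.pop() on the empty set raises KeyError → return max_l
  | fuel + 1, x :: rest, maxl =>
      searchLoop m fuel
        (((List.lookup x m).getD []).foldl
          (fun q i => if i ≠ 0 then PySem.Set.add q (x + i) else q) rest)
        (max x maxl)

def search (a : Int) (m : List (Int × List Int)) (n : Int) : Int :=
  searchLoop m (searchFuel m n) (PySem.Set.add PySem.Set.empty n) 0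

-- ===== PORT B =====
-- dfsB is Source B's inner dfs: best = x, then best = max(best, dfs(x+i)) for each nonzero
-- i in m.get(x, []).  The fuel argument (rankK m n + 1 at the top level) is only a
-- totalisation guard, proved sufficient under Pre_search (dfs_stable below).
def dfsB (m : List (Int × List Int)) : Nat → Int → Int
  | 0, x => x
  | fuel + 1, x =>
      ((List.lookup x m).getD []).foldl
        (fun best i => if i ≠ 0 then max best (dfsB m fuel (x + i)) else best) x

def search_alt (a : Int) (m : List (Int × List Int)) (n : Int) : Int :=
  max 0 (dfsB m (rankK m n + 1) n)

-- ===== PRECONDITION & SPEC =====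
-- Pre_search: no node reachable from n lies on an increment cycle.  On exactly the
-- excluded inputs A's worklist loop never returns (it diverges) and B's recursion never
-- bottoms out, so Pre_search excludes no input on which A returns a value.
def Pre_search (a : Int) (m : List (Int × List Int)) (n : Int) : Prop :=
  ∀ k ∈ reachK m n, ∀ z ∈ pySuccs m k, k ∉ reachK m z
instance (a : Int) (m : List (Int × List Int)) (n : Int) : Decidable (Pre_search a m n) := by
  unfold Pre_search; infer_instance

def pvWitness_search : Int × (List (Int × List Int)) × Int := (0, [(0, [1, 0]), (1, [2])], 0)

def Spec_search (a : Int) (m : List (Int × List Int)) (n : Int) (out : Int) : Prop := out = search_alt a m n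
instance (a : Int) (m : List (Int × List Int)) (n : Int) (out : Int) : Decidable (Spec_search a m n out) := by unfold Spec_search; infer_instance

-- ===== CLAIM (what is proved, stated in full; the proofs are below) =====
def Claim_equal_search : Prop := ∀ (a : Int) (m : List (Int × List Int)) (n : Int), Dom_search a m n → Pre_search a m n → Spec_search a m n (search a m n)

-- ===== LEMMAS AND PROOFS =====

-- the canonical value both programs compute at a node
def Mx (m : List (Int × List Int)) (x : Int) : Int := dfsB m (rankK m x + 1) x

def Phi (m : List (Int × List Int)) (q : List Int) : Nat := (q.map (searchFuel m)).sum

def Gfold (m : List (Int × List Int)) (b : Int) (q : List Int) : Int :=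
  q.foldl (fun b y => max b (Mx m y)) b

theorem lookup_mem (m : List (Int × List Int)) (x : Int) (s : List Int)
    (h : List.lookup x m = some s) : (x, s) ∈ m := by
  induction m with
  | nil => simp [List.lookup] at h
  | cons p t ih =>
    by_cases he : x = p.1
    · rw [List.lookup] at h
      simp [he] at h
      exact List.mem_cons.mpr (Or.inl (by cases p; simp_all))
    · rw [List.lookup] at h
      simp [(by simpa using he : (x == p.1) = false)] at h
      exact List.mem_cons.mpr (Or.inr (ih h))

theorem lookup_none_iff (m : List (Int × List Int)) (x : Int) :
    List.lookup x m = none ↔ x ∉ m.map Prod.fst := by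
  induction m with
  | nil => simp [List.lookup]
  | cons p t ih =>
    by_cases he : x = p.1
    · rw [List.lookup]; simp [he]
    · rw [List.lookup]
      simp only [(by simpa using he : (x == p.1) = false)]
      simp [ih, he]

theorem succs_nonkey (m : List (Int × List Int)) (x : Int)
    (h : x ∉ m.map Prod.fst) : pySuccs m x = [] := by
  rw [pySuccs, (lookup_none_iff m x).mpr h]; rfl

theorem mem_succs (m : List (Int × List Int)) (x : Int) (s : List Int)
    (hs : List.lookup x m = some s) (i : Int) (hi : i ∈ s) (hiz : i ≠ 0) :
    x + i ∈ pySuccs m x := by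
  rw [pySuccs, hs]
  exact List.mem_map.mpr ⟨i, List.mem_filter.mpr ⟨hi, by simpa⟩, rfl⟩

theorem subset_gstep (m : List (Int × List Int)) (S : Finset Int) : S ⊆ gstep m S :=
  Finset.subset_union_left

theorem gstep_mono (m : List (Int × List Int)) {S T : Finset Int} (h : S ⊆ T) :
    gstep m S ⊆ gstep m T :=
  Finset.union_subset_union h (Finset.biUnion_subset_biUnion_of_subset_left _ h)

def allSuccF (m : List (Int × List Int)) : Finset Int :=
  (m.flatMap (fun p => pySuccs m p.1)).toFinset

theorem gstep_bound (m : List (Int × List Int)) (S : Finset Int) :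
    gstep m S ⊆ S ∪ allSuccF m := by
  apply Finset.union_subset_union_right
  intro z hz
  obtain ⟨y, _, hzy⟩ := Finset.mem_biUnion.mp hz
  rw [List.mem_toFinset] at hzy
  by_cases hk : y ∈ m.map Prod.fst
  · obtain ⟨p, hp, hp1⟩ := List.mem_map.mp hk
    rw [allSuccF, List.mem_toFinset]
    exact List.mem_flatMap.mpr ⟨p, hp, by rwa [hp1]⟩
  · rw [succs_nonkey m y hk] at hzy; simp at hzy

theorem iterate_bound (m : List (Int × List Int)) (x : Int) :
    ∀ k, (gstep m)^[k] {x} ⊆ insert x (allSuccF m) := by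
  intro k
  induction k with
  | zero => simp
  | succ k ih =>
    rw [Function.iterate_succ_apply']
    intro z hz
    rcases Finset.mem_union.mp (gstep_bound m _ hz) with h | h
    · exact ih h
    · exact Finset.mem_insert_of_mem h

theorem s_len_le (m : List (Int × List Int)) (x : Int) (s : List Int)
    (h : (x, s) ∈ m) : s.length ≤ (m.map (fun p => p.2.length)).sum := by
  exact List.single_le_sum (by intro b _; omega) _
    (List.mem_map.mpr ⟨(x, s), h, rfl⟩)

theorem allSuccF_card (m : List (Int × List Int)) (x : Int) :
    (insert x (allSuccF m)).card ≤ reachT m := by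
  have h1 : (allSuccF m).card ≤ (m.flatMap (fun p => pySuccs m p.1)).length :=
    List.toFinset_card_le _
  have h2 : (m.flatMap (fun p => pySuccs m p.1)).length ≤
      m.length * (m.map (fun p => p.2.length)).sum := by
    rw [List.length_flatMap]
    have hterm : ∀ t ∈ m.map (fun p => (pySuccs m p.1).length),
        t ≤ (m.map (fun p => p.2.length)).sum := by
      intro t ht
      obtain ⟨p, hp, rfl⟩ := List.mem_map.mp ht
      rw [pySuccs, List.length_map]
      cases hl : List.lookup p.1 m with
      | none => simp
      | some s =>
        simp only [Option.getD_some]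
        calc (s.filter (fun i => decide (i ≠ 0))).length ≤ s.length :=
              List.length_filter_le _ _
          _ ≤ (m.map (fun p => p.2.length)).sum := s_len_le m p.1 s (lookup_mem m p.1 s hl)
    have := List.sum_le_card_nsmul _ _ hterm
    simpa [mul_comm] using this
  have h3 := Finset.card_insert_le x (allSuccF m)
  rw [reachT]
  omega

theorem iterate_mono_succ (m : List (Int × List Int)) (x : Int) (k : Nat) :
    (gstep m)^[k] {x} ⊆ (gstep m)^[k + 1] {x} := by
  rw [Function.iterate_succ_apply']
  exact subset_gstep m _

theorem stabilize (m : List (Int × List Int)) (x : Int) :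
    ∀ k, (gstep m)^[k] {x} = (gstep m)^[k + 1] {x} ∨ 1 + k ≤ ((gstep m)^[k] {x}).card := by
  intro k
  induction k with
  | zero => right; simp
  | succ k ih =>
    rcases ih with h | h
    · left
      have h2 := congrArg (gstep m) h
      rw [← Function.iterate_succ_apply' (gstep m) k,
        ← Function.iterate_succ_apply' (gstep m) (k + 1)] at h2
      exact h2
    · by_cases he : (gstep m)^[k] {x} = (gstep m)^[k + 1] {x}
      · left
        have h2 := congrArg (gstep m) he
        rw [← Function.iterate_succ_apply' (gstep m) k,
          ← Function.iterate_succ_apply' (gstep m) (k + 1)] at h2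
        exact h2
      · right
        have hss : (gstep m)^[k] {x} ⊂ (gstep m)^[k + 1] {x} :=
          Finset.ssubset_iff_subset_ne.mpr ⟨iterate_mono_succ m x k, he⟩
        have := Finset.card_lt_card hss
        omega

theorem reach_fixed (m : List (Int × List Int)) (x : Int) :
    gstep m (reachK m x) = reachK m x := by
  rcases stabilize m x (reachT m) with h | h
  · rw [reachK, ← Function.iterate_succ_apply' (gstep m) (reachT m) ({x} : Finset Int)]
    exact h.symm
  · exfalso
    have h2 := Finset.card_le_card (iterate_bound m x (reachT m))
    have h3 := allSuccF_card m (x := x)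
    omega

theorem mem_reach_self (m : List (Int × List Int)) (x : Int) : x ∈ reachK m x := by
  have : ∀ k, x ∈ (gstep m)^[k] {x} := by
    intro k
    induction k with
    | zero => simp
    | succ k ih => exact iterate_mono_succ m x k ih
  exact this _

theorem reach_closed (m : List (Int × List Int)) (x y z : Int)
    (hy : y ∈ reachK m x) (hz : z ∈ pySuccs m y) : z ∈ reachK m x := by
  rw [← reach_fixed m x]
  exact Finset.mem_union_right _ (Finset.mem_biUnion.mpr ⟨y, hy, List.mem_toFinset.mpr hz⟩)

theorem reach_trans (m : List (Int × List Int)) (x y : Int) (hy : y ∈ reachK m x) :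
    reachK m y ⊆ reachK m x := by
  have : ∀ k, (gstep m)^[k] {y} ⊆ reachK m x := by
    intro k
    induction k with
    | zero => simpa
    | succ k ih =>
      rw [Function.iterate_succ_apply']
      calc gstep m ((gstep m)^[k] {y}) ⊆ gstep m (reachK m x) := gstep_mono m ih
        _ = reachK m x := reach_fixed m x
  exact this _

theorem reach_nonkey (m : List (Int × List Int)) (x : Int)
    (h : x ∉ m.map Prod.fst) : reachK m x = {x} := by
  have hstep : gstep m {x} = {x} := by
    rw [gstep, Finset.singleton_biUnion, succs_nonkey m x h]
    simp
  have : ∀ k, (gstep m)^[k] {x} = {x} := by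
    intro k
    induction k with
    | zero => rfl
    | succ k ih => rw [Function.iterate_succ_apply', ih, hstep]
  exact this _

theorem rankK_pos (m : List (Int × List Int)) (x : Int) (hk : x ∈ m.map Prod.fst) :
    1 ≤ rankK m x := by
  rw [rankK, Nat.one_le_iff_ne_zero, ← Nat.pos_iff_ne_zero, Finset.card_pos]
  exact ⟨x, Finset.mem_inter.mpr ⟨mem_reach_self m x, List.mem_toFinset.mpr hk⟩⟩

theorem rankK_zero_nonkey (m : List (Int × List Int)) (x : Int)
    (h : x ∉ m.map Prod.fst) : rankK m x = 0 := by
  rw [rankK, reach_nonkey m x h, Finset.card_eq_zero, Finset.singleton_inter_of_notMem]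
  simpa using h

theorem rankK_lt (m : List (Int × List Int)) (n x z : Int)
    (hp : ∀ k ∈ reachK m n, ∀ z ∈ pySuccs m k, k ∉ reachK m z)
    (hx : x ∈ reachK m n) (hz : z ∈ pySuccs m x) : rankK m z < rankK m x := by
  have hxk : x ∈ m.map Prod.fst := by
    by_contra hc
    rw [succs_nonkey m x hc] at hz; simp at hz
  have hzx : z ∈ reachK m x := reach_closed m x x z (mem_reach_self m x) hz
  have hsub : reachK m z ⊆ reachK m x := reach_trans m x z hzx
  have hnx : x ∉ reachK m z := hp x hx z hz
  apply Finset.card_lt_card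
  constructor
  · exact Finset.inter_subset_inter_right hsub
  · intro hcon
    exact hnx (Finset.mem_inter.mp
      (hcon (Finset.mem_inter.mpr ⟨mem_reach_self m x, List.mem_toFinset.mpr hxk⟩))).1

theorem two_le_fuelC (m : List (Int × List Int)) : 2 ≤ fuelC m := by
  rw [fuelC]; omega

theorem one_le_searchFuel (m : List (Int × List Int)) (x : Int) : 1 ≤ searchFuel m x :=
  Nat.one_le_pow _ _ (by have := two_le_fuelC m; omega)

theorem fuel_succ_le (m : List (Int × List Int)) (n x : Int)
    (hp : ∀ k ∈ reachK m n, ∀ z ∈ pySuccs m k, k ∉ reachK m z)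
    (hx : x ∈ reachK m n) (z : Int) (hz : z ∈ pySuccs m x) :
    searchFuel m z ≤ fuelC m ^ (rankK m x - 1) := by
  by_cases hk : z ∈ m.map Prod.fst
  · have := rankK_lt m n x z hp hx hz
    rw [searchFuel]
    exact Nat.pow_le_pow_right (by have := two_le_fuelC m; omega) (by omega)
  · rw [searchFuel, rankK_zero_nonkey m z hk, pow_zero]
    exact Nat.one_le_pow _ _ (by have := two_le_fuelC m; omega)

theorem fuel_key (m : List (Int × List Int)) (n x : Int)
    (hp : ∀ k ∈ reachK m n, ∀ z ∈ pySuccs m k, k ∉ reachK m z)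
    (hx : x ∈ reachK m n) (s : List Int) (hlk : List.lookup x m = some s) :
    1 + (s.map (fun i => if i ≠ 0 then searchFuel m (x + i) else 0)).sum ≤ searchFuel m x := by
  have hxk : x ∈ m.map Prod.fst := List.mem_map.mpr ⟨(x, s), lookup_mem m x s hlk, rfl⟩
  have hr1 : 1 ≤ rankK m x := rankK_pos m x hxk
  set r := rankK m x with hr
  set C := fuelC m with hC
  set P := C ^ (r - 1) with hP
  have hterm : ∀ t ∈ s.map (fun i => if i ≠ 0 then searchFuel m (x + i) else 0), t ≤ P := by
    intro t ht
    obtain ⟨i, hi, rfl⟩ := List.mem_map.mp ht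
    by_cases hiz : i ≠ 0
    · rw [if_pos hiz]
      exact fuel_succ_le m n x hp hx (x + i) (mem_succs m x s hlk i hi hiz)
    · rw [if_neg hiz]; exact Nat.zero_le _
  have hsum : (s.map (fun i => if i ≠ 0 then searchFuel m (x + i) else 0)).sum ≤
      s.length * P := by
    have := List.sum_le_card_nsmul _ P hterm
    simpa [mul_comm] using this
  have hlen : s.length ≤ C - 2 := by
    have := s_len_le m x s (lookup_mem m x s hlk)
    rw [hC, fuelC]; omega
  have h1P : 1 ≤ P := Nat.one_le_pow _ _ (by have := two_le_fuelC m; rw [← hC] at this; omega)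
  have hCP : searchFuel m x = C * P := by
    rw [searchFuel, ← hr, ← hC, hP, ← pow_succ']
    congr 1
    omega
  have h2C : 2 ≤ C := by have := two_le_fuelC m; rw [← hC] at this; exact this
  calc 1 + (s.map (fun i => if i ≠ 0 then searchFuel m (x + i) else 0)).sum
      ≤ 1 + s.length * P := by omega
    _ ≤ P + (C - 2) * P := by
        have := Nat.mul_le_mul_right P hlen
        omega
    _ ≤ C * P := by
        have he : (C - 1) * P = (C - 2) * P + P := by
          have hc : C - 1 = (C - 2) + 1 := by omega
          rw [hc, Nat.succ_mul]
        have h2 : (C - 1) * P ≤ C * P := Nat.mul_le_mul_right P (by omega)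
        omega
    _ = searchFuel m x := hCP.symm

theorem dfs_stable (m : List (Int × List Int)) (n : Int)
    (hp : ∀ k ∈ reachK m n, ∀ z ∈ pySuccs m k, k ∉ reachK m z) :
    ∀ fuel x, x ∈ reachK m n → rankK m x < fuel → dfsB m fuel x = Mx m x := by
  intro fuel
  induction fuel using Nat.strong_induction_on with
  | _ fuel IH =>
    intro x hxR hx
    match fuel, hx with
    | f + 1, hx =>
      show dfsB m (f + 1) x = dfsB m (rankK m x + 1) x
      rw [dfsB, dfsB]
      cases hl : List.lookup x m with
      | none => simp
      | some s =>
        simp only [Option.getD_some]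
        apply PySem.List.foldl_congr_mem'
        intro i hi acc
        by_cases hiz : i ≠ 0
        · rw [if_pos hiz, if_pos hiz]
          have hzs : x + i ∈ pySuccs m x := mem_succs m x s hl i hi hiz
          have hzR : x + i ∈ reachK m n := reach_closed m n x (x + i) hxR hzs
          have hrk := rankK_lt m n x (x + i) hp hxR hzs
          rw [IH f (by omega) (x + i) hzR (by omega),
            IH (rankK m x) (by omega) (x + i) hzR (by omega)]
        · rw [if_neg hiz, if_neg hiz]

theorem M_unfold (m : List (Int × List Int)) (n : Int)
    (hp : ∀ k ∈ reachK m n, ∀ z ∈ pySuccs m k, k ∉ reachK m z)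
    (x : Int) (hxR : x ∈ reachK m n) :
    Mx m x = ((List.lookup x m).getD []).foldl
      (fun v i => if i ≠ 0 then max v (Mx m (x + i)) else v) x := by
  show dfsB m (rankK m x + 1) x = _
  rw [dfsB]
  cases hl : List.lookup x m with
  | none => simp
  | some s =>
    simp only [Option.getD_some]
    apply PySem.List.foldl_congr_mem'
    intro i hi acc
    by_cases hiz : i ≠ 0
    · rw [if_pos hiz, if_pos hiz]
      have hzs : x + i ∈ pySuccs m x := mem_succs m x s hl i hi hiz
      have hzR : x + i ∈ reachK m n := reach_closed m n x (x + i) hxR hzs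
      rw [dfs_stable m n hp (rankK m x) (x + i) hzR (rankK_lt m n x (x + i) hp hxR hzs)]
    · rw [if_neg hiz, if_neg hiz]

theorem Phi_add (m : List (Int × List Int)) (q : PySem.Set Int) (y : Int) :
    Phi m (PySem.Set.add q y) ≤ Phi m q + searchFuel m y := by
  simp only [PySem.Set.add, PySem.Set.contains]
  split
  · omega
  · simp [Phi]

theorem Phi_addloop (m : List (Int × List Int)) (x : Int) :
    ∀ (s : List Int) (rest : PySem.Set Int),
      Phi m (s.foldl (fun q i => if i ≠ 0 then PySem.Set.add q (x + i) else q) rest) ≤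
        Phi m rest + (s.map (fun i => if i ≠ 0 then searchFuel m (x + i) else 0)).sum := by
  intro s
  induction s with
  | nil => simp
  | cons i t ih =>
    intro rest
    simp only [List.foldl_cons, List.map_cons, List.sum_cons]
    by_cases hiz : i ≠ 0
    · rw [if_pos hiz, if_pos hiz]
      have h1 := ih (PySem.Set.add rest (x + i))
      have h2 := Phi_add m rest (x + i)
      omega
    · rw [if_neg hiz, if_neg hiz]
      have := ih rest
      omega

theorem mem_addloop (m : List (Int × List Int)) (x : Int) :
    ∀ (s : List Int) (rest : PySem.Set Int) (y : Int),
      y ∈ s.foldl (fun q i => if i ≠ 0 then PySem.Set.add q (x + i) else q) rest →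
      y ∈ rest ∨ ∃ i ∈ s, i ≠ 0 ∧ y = x + i := by
  intro s
  induction s with
  | nil => intro rest y h; exact Or.inl h
  | cons i t ih =>
    intro rest y h
    simp only [List.foldl_cons] at h
    by_cases hiz : i ≠ 0
    · rw [if_pos hiz] at h
      rcases ih _ y h with h1 | ⟨j, hj, hjz, hje⟩
      · rcases (PySem.Set.mem_add _ _ _).mp h1 with h2 | h2
        · exact Or.inl h2
        · exact Or.inr ⟨i, List.mem_cons_self, hiz, h2⟩
      · exact Or.inr ⟨j, List.mem_cons_of_mem _ hj, hjz, hje⟩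
    · rw [if_neg hiz] at h
      rcases ih _ y h with h1 | ⟨j, hj, hjz, hje⟩
      · exact Or.inl h1
      · exact Or.inr ⟨j, List.mem_cons_of_mem _ hj, hjz, hje⟩

theorem G_init_max (m : List (Int × List Int)) :
    ∀ (q : List Int) (b c : Int), Gfold m (max b c) q = max (Gfold m b q) c := by
  intro q
  induction q with
  | nil => intro b c; rfl
  | cons y t ih =>
    intro b c
    show Gfold m (max (max b c) (Mx m y)) t = max (Gfold m (max b (Mx m y)) t) c
    rw [(by omega : max (max b c) (Mx m y) = max (max b (Mx m y)) c), ih]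

theorem G_ge_init (m : List (Int × List Int)) :
    ∀ (q : List Int) (b : Int), b ≤ Gfold m b q := by
  intro q
  induction q with
  | nil => intro b; exact le_refl b
  | cons z t ih =>
    intro b
    show b ≤ Gfold m (max b (Mx m z)) t
    exact le_trans (le_max_left _ _) (ih _)

theorem G_mem (m : List (Int × List Int)) (q : List Int) (b y : Int) (hy : y ∈ q) :
    Mx m y ≤ Gfold m b q := by
  induction q generalizing b with
  | nil => simp at hy
  | cons z t ih =>
    show Mx m y ≤ Gfold m (max b (Mx m z)) t
    rcases List.mem_cons.mp hy with h1 | h2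
    · subst h1
      exact le_trans (le_max_right b (Mx m y)) (G_ge_init m t _)
    · exact ih _ h2

theorem G_add (m : List (Int × List Int)) (q : PySem.Set Int) (b y : Int) :
    Gfold m b (PySem.Set.add q y) = max (Gfold m b q) (Mx m y) := by
  simp only [PySem.Set.add, PySem.Set.contains]
  split
  · next h =>
    have hy : y ∈ q := by simpa using h
    have := G_mem m q b y hy
    omega
  · show Gfold m b (q ++ [y]) = _
    unfold Gfold
    rw [List.foldl_append]
    rfl

theorem G_addloop (m : List (Int × List Int)) (x : Int) :
    ∀ (s : List Int) (rest : PySem.Set Int) (b : Int),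
      Gfold m b (s.foldl (fun q i => if i ≠ 0 then PySem.Set.add q (x + i) else q) rest) =
        s.foldl (fun v i => if i ≠ 0 then max v (Mx m (x + i)) else v) (Gfold m b rest) := by
  intro s
  induction s with
  | nil => intro rest b; rfl
  | cons i t ih =>
    intro rest b
    simp only [List.foldl_cons]
    by_cases hiz : i ≠ 0
    · rw [if_pos hiz, if_pos hiz, ih, G_add]
    · rw [if_neg hiz, if_neg hiz, ih]

theorem foldl_maxstep_max (m : List (Int × List Int)) (x : Int) :
    ∀ (s : List Int) (c d : Int),
      s.foldl (fun v i => if i ≠ 0 then max v (Mx m (x + i)) else v) (max c d) =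
        max c (s.foldl (fun v i => if i ≠ 0 then max v (Mx m (x + i)) else v) d) := by
  intro s
  induction s with
  | nil => intro c d; rfl
  | cons i t ih =>
    intro c d
    simp only [List.foldl_cons]
    by_cases hiz : i ≠ 0
    · rw [if_pos hiz, if_pos hiz, (by omega : max (max c d) (Mx m (x + i)) = max c (max d (Mx m (x + i)))), ih]
    · rw [if_neg hiz, if_neg hiz, ih]

theorem loop_eq (m : List (Int × List Int)) (n : Int)
    (hp : ∀ k ∈ reachK m n, ∀ z ∈ pySuccs m k, k ∉ reachK m z) :
    ∀ (fuel : Nat) (q : PySem.Set Int) (maxl : Int),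
      (∀ y ∈ q, y ∈ reachK m n) → Phi m q ≤ fuel →
      searchLoop m fuel q maxl = Gfold m maxl q := by
  intro fuel
  induction fuel with
  | zero =>
    intro q maxl _ hq
    cases q with
    | nil => rfl
    | cons y t =>
      exfalso
      have h1 := one_le_searchFuel m y
      simp [Phi] at hq
      omega
  | succ fuel ih =>
    intro q maxl hmem hq
    cases q with
    | nil => rfl
    | cons x rest =>
      have hxR : x ∈ reachK m n := hmem x List.mem_cons_self
      rw [searchLoop]
      have hsum : Phi m rest +
          (((List.lookup x m).getD []).map (fun i => if i ≠ 0 then searchFuel m (x + i) else 0)).sum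
          ≤ Phi m rest + searchFuel m x - 1 := by
        cases hl : List.lookup x m with
        | none =>
          simp only [Option.getD_none, List.map_nil, List.sum_nil]
          have := one_le_searchFuel m x
          omega
        | some s =>
          simp only [Option.getD_some]
          have := fuel_key m n x hp hxR s hl
          omega
      have hrest : Phi m (x :: rest) = searchFuel m x + Phi m rest := by simp [Phi]
      have hΦ : Phi m (((List.lookup x m).getD []).foldl
          (fun q i => if i ≠ 0 then PySem.Set.add q (x + i) else q) rest) ≤ fuel := by
        have := Phi_addloop m x ((List.lookup x m).getD []) rest
        omega
      have hmem' : ∀ y ∈ ((List.lookup x m).getD []).foldl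
          (fun q i => if i ≠ 0 then PySem.Set.add q (x + i) else q) rest, y ∈ reachK m n := by
        intro y hy
        rcases mem_addloop m x _ rest y hy with h1 | ⟨i, hi, hiz, rfl⟩
        · exact hmem y (List.mem_cons_of_mem _ h1)
        · cases hl : List.lookup x m with
          | none => rw [hl] at hi; simp at hi
          | some s =>
            rw [hl] at hi
            exact reach_closed m n x (x + i) hxR (mem_succs m x s hl i hi hiz)
      rw [ih _ _ hmem' hΦ, G_addloop]
      have hx : Gfold m (max x maxl) rest = max (Gfold m maxl rest) x := by
        rw [(by omega : (max x maxl : Int) = max maxl x), G_init_max]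
      rw [hx, foldl_maxstep_max]
      show _ = Gfold m (max maxl (Mx m x)) rest
      rw [G_init_max, M_unfold m n hp x hxR]

theorem A_eq (a : Int) (m : List (Int × List Int)) (n : Int)
    (hp : ∀ k ∈ reachK m n, ∀ z ∈ pySuccs m k, k ∉ reachK m z) :
    search a m n = max 0 (Mx m n) := by
  show searchLoop m (searchFuel m n) (PySem.Set.add PySem.Set.empty n) 0 = _
  have hq : PySem.Set.add PySem.Set.empty n = [n] := rfl
  rw [hq, loop_eq m n hp _ _ _
    (by intro y hy; rw [List.mem_singleton.mp hy]; exact mem_reach_self m n)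
    (by simp [Phi])]
  rfl

-- ===== VERDICT (by name: the statement is the Claim_ definition above) =====
theorem search_spec : Claim_equal_search := by
  intro a m n _ hpre
  unfold Spec_search
  rw [A_eq a m n hpre]
  rfl
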